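-- pv_equiv track=rewrite | github.com/scawful/Oracle-of-Secrets | scripts/symbols.py | resolve_symbol
-- ===== SOURCE A (Python) =====
-- def resolve_symbol(sym: dict[int, list[tuple[int, str]]], bank: int | None, pc: int | None) -> str | None:
--     if bank is None or pc is None:
--         return None
--     entries = sym.get(bank)
--     if not entries:
--         return f"{bank:02X}:{pc:04X}"
--     lo = 0
--     hi = len(entries) - 1
--     best = None
--     while lo <= hi:
--         mid = (lo + hi) // 2
--         addr, label = entries[mid]
--         if addr == pc:
--             best = (addr, label)
--             break
--         if addr < pc:
--             best = (addr, label)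
--             lo = mid + 1
--         else:
--             hi = mid - 1
--     if best is None:
--         return f"{bank:02X}:{pc:04X}"
--     addr, label = best
--     delta = pc - addr
--     if delta == 0:
--         return f"{label}"
--     return f"{label}+0x{delta:X}"
-- ===== SOURCE B (Python) =====
-- def resolve_symbol(sym: dict[int, list[tuple[int, str]]], bank: int | None, pc: int | None) -> str | None:
--     if bank is None or pc is None:
--         return None
--     entries = sym.get(bank)
--     if not entries:
--         return f"{bank:02X}:{pc:04X}"
--
--     def search(seg, best):
--         if not seg:
--             return best
--         m = (len(seg) - 1) // 2
--         addr, label = seg[m]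
--         if addr == pc:
--             return (addr, label)
--         if addr < pc:
--             return search(seg[m + 1:], (addr, label))
--         return search(seg[:m], best)
--
--     best = search(entries, None)
--     if best is None:
--         return f"{bank:02X}:{pc:04X}"
--     addr, label = best
--     delta = pc - addr
--     if delta == 0:
--         return f"{label}"
--     return f"{label}+0x{delta:X}"
-- ===== Notes on version B (the rewrite author's own statement) =====
-- stated objective: alternative
-- what changed: The index-pair (lo/hi) while-loop binary search is replaced by a recursive divide-and-conquer that passes the searched segment itself as a list slice (no indices, no mutable state), preserving the exact comparison sequence.
import Mathlib
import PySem

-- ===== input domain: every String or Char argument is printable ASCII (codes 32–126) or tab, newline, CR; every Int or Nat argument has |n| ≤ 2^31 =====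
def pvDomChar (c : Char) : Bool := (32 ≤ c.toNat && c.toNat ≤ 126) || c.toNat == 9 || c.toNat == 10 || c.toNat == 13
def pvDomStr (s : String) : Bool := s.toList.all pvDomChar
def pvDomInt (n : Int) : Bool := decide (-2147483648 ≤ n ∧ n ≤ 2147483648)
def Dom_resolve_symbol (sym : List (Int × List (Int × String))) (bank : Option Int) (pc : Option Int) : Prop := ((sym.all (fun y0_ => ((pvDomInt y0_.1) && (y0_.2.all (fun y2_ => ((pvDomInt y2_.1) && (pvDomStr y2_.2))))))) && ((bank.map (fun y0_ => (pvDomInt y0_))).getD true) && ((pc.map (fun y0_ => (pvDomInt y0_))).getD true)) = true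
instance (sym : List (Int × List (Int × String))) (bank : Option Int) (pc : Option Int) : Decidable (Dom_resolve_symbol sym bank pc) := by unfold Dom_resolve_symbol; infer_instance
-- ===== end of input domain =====

-- B replaces A's lo/hi while-loop binary search by a recursive divide-and-conquer on list
-- slices (different decomposition, same comparison sequence; no speed claim).

-- shared formatting helpers (both Pythons build the same f-strings)
def hexDigit (d : Nat) : Char := if d < 10 then Char.ofNat (48 + d) else Char.ofNat (55 + d)

-- hex digits of a positive Nat, most significant first (format(n, 'X') body)
def natHexAux (n : Nat) : List Char :=
  if n = 0 then [] else natHexAux (n / 16) ++ [hexDigit (n % 16)]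
decreasing_by exact Nat.div_lt_self (Nat.pos_of_ne_zero (by omega)) (by omega)

def natHex (n : Nat) : List Char := if n = 0 then ['0'] else natHexAux n

-- format(n, '0{w}X'): zero-pad; for negatives the '-' counts toward the width
def hexPad (n : Int) (w : Nat) : List Char :=
  if n < 0 then
    '-' :: (List.replicate ((w - 1) - (natHex n.natAbs).length) '0' ++ natHex n.natAbs)
  else List.replicate (w - (natHex n.toNat).length) '0' ++ natHex n.toNat

-- f"{bank:02X}:{pc:04X}"
def fmtAddr (bank pc : Int) : String := String.ofList (hexPad bank 2 ++ ':' :: hexPad pc 4)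

-- f"{label}+0x{delta:X}"
def fmtPlus (label : String) (delta : Int) : String :=
  String.ofList (label.toList ++ '+' :: '0' :: 'x' :: hexPad delta 0)

-- ===== PORT A =====
-- the while-loop: lo/hi indices, best accumulator
def loopA (es : List (Int × String)) (pc : Int) (lo hi : Int) (best : Option (Int × String)) :
    Option (Int × String) :=
  if _h : lo ≤ hi then
    let mid := PySem.Int.floordiv (lo + hi) 2
    match PySem.List.pyGet? es mid with
    | none => best  -- unreachable guard for totality: mid is always in range in A's loop
    | some (addr, label) =>
      if addr = pc then some (addr, label)
      else if addr < pc then loopA es pc (mid + 1) hi (some (addr, label))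
      else loopA es pc lo (mid - 1) best
  else best
termination_by (hi + 1 - lo).toNat
decreasing_by
  · have h2 := PySem.Int.floordiv_two_mid_bounds (lo := lo) (hi := hi) _h
    omega
  · have h2 := PySem.Int.floordiv_two_mid_bounds (lo := lo) (hi := hi) _h
    omega

def resolve_symbol (sym : List (Int × List (Int × String))) (bank : Option Int) (pc : Option Int) : Option String :=
  match bank, pc with
  | some b, some p =>
    match PySem.Dict.get? ⟨sym⟩ b with
    | none => some (fmtAddr b p)
    | some es =>
      if es = [] then some (fmtAddr b p)
      else
        match loopA es p 0 ((es.length : Int) - 1) none with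
        | none => some (fmtAddr b p)
        | some (addr, label) =>
          let delta := p - addr
          if delta = 0 then some label else some (fmtPlus label delta)
  | _, _ => none

-- ===== PORT B =====
-- recursive divide-and-conquer on the segment itself (Source B's `search`)
def searchB (pc : Int) (seg : List (Int × String)) (best : Option (Int × String)) :
    Option (Int × String) :=
  if _h : seg = [] then best
  else
    let m := PySem.Int.floordiv ((seg.length : Int) - 1) 2
    -- `.elim best …`: the none (IndexError) side is an unreachable guard for totality, m is in range
    (PySem.List.pyGet? seg m).elim best (fun al =>
      if al.1 = pc then some al
      else if al.1 < pc then searchB pc (PySem.List.slice seg (some (m + 1)) none) (some al)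
      else searchB pc (PySem.List.slice seg none (some m)) best)
termination_by seg.length
decreasing_by
  · have hb := PySem.Int.floordiv_two_mid_bounds (lo := 0) (hi := (seg.length : Int) - 1)
      (by have : seg.length ≠ 0 := fun h0 => _h (List.eq_nil_of_length_eq_zero h0); omega)
    simp only [zero_add] at hb
    rw [PySem.List.slice_from seg (by omega)]
    simp only [List.length_drop]
    omega
  · have hb := PySem.Int.floordiv_two_mid_bounds (lo := 0) (hi := (seg.length : Int) - 1)
      (by have : seg.length ≠ 0 := fun h0 => _h (List.eq_nil_of_length_eq_zero h0); omega)
    simp only [zero_add] at hb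
    rw [PySem.List.slice_to seg (by omega)]
    simp only [List.length_take]
    omega

def resolve_symbol_alt (sym : List (Int × List (Int × String))) (bank : Option Int) (pc : Option Int) : Option String :=
  match bank, pc with
  | none, _ => none
  | _, none => none
  | some b, some p =>
    -- sym.get(bank): a missing key and an empty entry list behave alike ("if not entries")
    let entries := (PySem.Dict.get? ⟨sym⟩ b).getD []
    if entries = [] then some (fmtAddr b p)
    else
      (searchB p entries none).elim (some (fmtAddr b p)) (fun al =>
        let delta := p - al.1
        if delta = 0 then some al.2 else some (fmtPlus al.2 delta))

-- ===== PRECONDITION & SPEC =====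
def Spec_resolve_symbol (sym : List (Int × List (Int × String))) (bank : Option Int) (pc : Option Int) (out : Option String) : Prop := out = resolve_symbol_alt sym bank pc
instance (sym : List (Int × List (Int × String))) (bank : Option Int) (pc : Option Int) (out : Option String) : Decidable (Spec_resolve_symbol sym bank pc out) := by unfold Spec_resolve_symbol; infer_instance

-- ===== CLAIM (what is proved, stated in full; the proofs are below) =====
def Claim_equal_resolve_symbol : Prop := ∀ (sym : List (Int × List (Int × String))) (bank : Option Int) (pc : Option Int), Dom_resolve_symbol sym bank pc → Spec_resolve_symbol sym bank pc (resolve_symbol sym bank pc)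

-- ===== LEMMAS AND PROOFS =====

-- A's loop on window [lo, hi] equals B's recursion on the corresponding sublist.
theorem loopA_eq_searchB (es : List (Int × String)) (pc lo hi : Int) (best : Option (Int × String)) :
    0 ≤ lo → hi ≤ (es.length : Int) - 1 →
    loopA es pc lo hi best = searchB pc ((es.drop lo.toNat).take (hi + 1 - lo).toNat) best := by
  fun_induction loopA es pc lo hi best with
  | case1 lo hi best hle mid hnone =>
    intro h0 h1
    have hmb := PySem.Int.floordiv_two_mid_bounds (lo := lo) (hi := hi) hle
    have := (PySem.List.pyGet?_eq_none_iff es mid).mp hnone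
    simp only [PySem.Raise.InRange] at this
    omega
  | case2 lo hi best hle mid label hget =>
    intro h0 h1
    have hmb := PySem.Int.floordiv_two_mid_bounds (lo := lo) (hi := hi) hle
    have he : mid = (lo + hi) / 2 := PySem.Int.floordiv_eq_ediv_of_pos (by norm_num)
    have hlen : ((es.drop lo.toNat).take (hi + 1 - lo).toNat).length = (hi + 1 - lo).toNat := by
      simp only [List.length_take, List.length_drop]; omega
    have hne : (es.drop lo.toNat).take (hi + 1 - lo).toNat ≠ [] := by
      intro hg; rw [hg] at hlen; simp at hlen; omega
    have hm : PySem.Int.floordiv (((((es.drop lo.toNat).take (hi + 1 - lo).toNat).length : Int)) - 1) 2 = mid - lo := by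
      rw [hlen, PySem.Int.floordiv_eq_ediv_of_pos (by norm_num)]; omega
    have hgs : PySem.List.pyGet? ((es.drop lo.toNat).take (hi + 1 - lo).toNat) (mid - lo) = PySem.List.pyGet? es mid := by
      rw [PySem.List.pyGet?_of_nonneg _ (by omega), PySem.List.pyGet?_of_nonneg _ (by omega)]
      rw [List.getElem?_take, if_pos (by omega), List.getElem?_drop]
      congr 1; omega
    rw [searchB, dif_neg hne]
    simp only [hm]
    rw [hgs, hget]
    simp
  | case3 lo hi best hle mid addr label hget hne1 hlt ih =>
    intro h0 h1
    have hmb := PySem.Int.floordiv_two_mid_bounds (lo := lo) (hi := hi) hle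
    have he : mid = (lo + hi) / 2 := PySem.Int.floordiv_eq_ediv_of_pos (by norm_num)
    have hlen : ((es.drop lo.toNat).take (hi + 1 - lo).toNat).length = (hi + 1 - lo).toNat := by
      simp only [List.length_take, List.length_drop]; omega
    have hne : (es.drop lo.toNat).take (hi + 1 - lo).toNat ≠ [] := by
      intro hg; rw [hg] at hlen; simp at hlen; omega
    have hm : PySem.Int.floordiv (((((es.drop lo.toNat).take (hi + 1 - lo).toNat).length : Int)) - 1) 2 = mid - lo := by
      rw [hlen, PySem.Int.floordiv_eq_ediv_of_pos (by norm_num)]; omega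
    have hgs : PySem.List.pyGet? ((es.drop lo.toNat).take (hi + 1 - lo).toNat) (mid - lo) = PySem.List.pyGet? es mid := by
      rw [PySem.List.pyGet?_of_nonneg _ (by omega), PySem.List.pyGet?_of_nonneg _ (by omega)]
      rw [List.getElem?_take, if_pos (by omega), List.getElem?_drop]
      congr 1; omega
    have hslice : PySem.List.slice ((es.drop lo.toNat).take (hi + 1 - lo).toNat) (some (mid - lo + 1)) none
        = (es.drop (mid + 1).toNat).take (hi + 1 - (mid + 1)).toNat := by
      rw [PySem.List.slice_from (a := mid - lo + 1) _ (by omega), List.drop_take, List.drop_drop]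
      have e1 : (hi + 1 - lo).toNat - (mid - lo + 1).toNat = (hi + 1 - (mid + 1)).toNat := by omega
      have e2 : lo.toNat + (mid - lo + 1).toNat = (mid + 1).toNat := by omega
      rw [e1, e2]
    rw [searchB, dif_neg hne]
    simp only [hm]
    rw [hgs, hget]
    simp only [Option.elim, if_neg hne1, if_pos hlt, hslice]
    exact ih (by omega) h1
  | case4 lo hi best hle mid addr label hget hne1 hge ih =>
    intro h0 h1
    have hmb := PySem.Int.floordiv_two_mid_bounds (lo := lo) (hi := hi) hle
    have he : mid = (lo + hi) / 2 := PySem.Int.floordiv_eq_ediv_of_pos (by norm_num)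
    have hlen : ((es.drop lo.toNat).take (hi + 1 - lo).toNat).length = (hi + 1 - lo).toNat := by
      simp only [List.length_take, List.length_drop]; omega
    have hne : (es.drop lo.toNat).take (hi + 1 - lo).toNat ≠ [] := by
      intro hg; rw [hg] at hlen; simp at hlen; omega
    have hm : PySem.Int.floordiv (((((es.drop lo.toNat).take (hi + 1 - lo).toNat).length : Int)) - 1) 2 = mid - lo := by
      rw [hlen, PySem.Int.floordiv_eq_ediv_of_pos (by norm_num)]; omega
    have hgs : PySem.List.pyGet? ((es.drop lo.toNat).take (hi + 1 - lo).toNat) (mid - lo) = PySem.List.pyGet? es mid := by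
      rw [PySem.List.pyGet?_of_nonneg _ (by omega), PySem.List.pyGet?_of_nonneg _ (by omega)]
      rw [List.getElem?_take, if_pos (by omega), List.getElem?_drop]
      congr 1; omega
    have hslice : PySem.List.slice ((es.drop lo.toNat).take (hi + 1 - lo).toNat) none (some (mid - lo))
        = (es.drop lo.toNat).take (mid - 1 + 1 - lo).toNat := by
      rw [PySem.List.slice_to (b := mid - lo) _ (by omega), List.take_take]
      congr 1; omega
    rw [searchB, dif_neg hne]
    simp only [hm]
    rw [hgs, hget]
    simp only [Option.elim, if_neg hne1, if_neg hge, hslice]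
    exact ih h0 (by omega)
  | case5 lo hi best hgt =>
    intro h0 h1
    have hk : (hi + 1 - lo).toNat = 0 := by omega
    rw [hk, List.take_zero, searchB, dif_pos rfl]

theorem resolve_symbol_spec : Claim_equal_resolve_symbol := by
  intro sym bank pc _
  unfold Spec_resolve_symbol resolve_symbol resolve_symbol_alt
  match bank, pc with
  | none, _ => cases pc <;> rfl
  | some b, none => rfl
  | some b, some p =>
    simp only
    cases hd : PySem.Dict.get? (⟨sym⟩ : PySem.Dict Int (List (Int × String))) b with
    | none => simp
    | some es =>
      simp only [Option.getD_some]
      by_cases hes : es = []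
      · subst hes; simp
      · have h := loopA_eq_searchB es p 0 ((es.length : Int) - 1) none (le_refl 0) (le_refl _)
        have ht : ((es.length : Int) - 1 + 1 - 0).toNat = es.length := by omega
        rw [Int.toNat_zero, List.drop_zero, ht, List.take_length] at h
        rw [if_neg hes, if_neg hes, h]
        cases searchB p es none with
        | none => rfl
        | some al => rfl
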